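-- pv_equiv track=rewrite | github.com/SanTiepi/SwissBuilding | backend/app/services/neighborhood_analysis_service.py | _era_bucket
-- ===== SOURCE A (Python) =====
-- _ERA_BUCKETS = [
--     (1940, 1950, "1940-1950"),
--     (1950, 1960, "1950-1960"),
--     (1960, 1970, "1960-1970"),
--     (1970, 1980, "1970-1980"),
--     (1980, 1990, "1980-1990"),
--     (1990, 2000, "1990-2000"),
--     (2000, 2010, "2000-2010"),
--     (2010, 2030, "2010+"),
-- ]
--
-- def _era_bucket(year: int | None) -> str:
--     if year is None:
--         return "unknown"
--     for lo, hi, label in _ERA_BUCKETS: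
--         if lo <= year < hi:
--             return label
--     if year < 1940:
--         return "pre-1940"
--     return "2010+"
-- ===== SOURCE B (Python) =====
-- def _era_bucket(year):
--     if year is None:
--         return "unknown"
--     if year < 1940:
--         return "pre-1940"
--     if year >= 2010:
--         return "2010+"
--     decade = (year // 10) * 10
--     return f"{decade}-{decade + 10}"
-- ===== Notes on version B (the rewrite author's own statement) =====
-- stated objective: simpler
-- what changed: Replaced the linear scan over the _ERA_BUCKETS table with a closed-form decade computation ((year//10)*10) plus two range checks, dropping the table entirely.
import Mathlib
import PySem

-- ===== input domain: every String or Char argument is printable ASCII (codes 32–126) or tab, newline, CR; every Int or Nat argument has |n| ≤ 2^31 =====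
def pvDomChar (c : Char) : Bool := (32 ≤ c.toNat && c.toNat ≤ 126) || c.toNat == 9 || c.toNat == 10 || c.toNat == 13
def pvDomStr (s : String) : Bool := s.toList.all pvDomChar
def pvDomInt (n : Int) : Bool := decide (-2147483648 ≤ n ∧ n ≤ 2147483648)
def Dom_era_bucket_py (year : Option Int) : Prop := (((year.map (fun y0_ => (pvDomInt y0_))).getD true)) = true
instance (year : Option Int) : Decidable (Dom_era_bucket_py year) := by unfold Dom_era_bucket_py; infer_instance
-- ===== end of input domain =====

-- ===== PORT A =====
-- B drops the constant bucket table for a closed-form decade computation (simpler).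
def eraBuckets : List (Int × Int × String) :=
  [(1940, 1950, "1940-1950"), (1950, 1960, "1950-1960"), (1960, 1970, "1960-1970"),
   (1970, 1980, "1970-1980"), (1980, 1990, "1980-1990"), (1990, 2000, "1990-2000"),
   (2000, 2010, "2000-2010"), (2010, 2030, "2010+")]

-- the 'for' loop with early return, as a structural scan over the table
def eraScan (y : Int) : List (Int × Int × String) → Option String
  | [] => none
  | (lo, hi, label) :: rest => if lo ≤ y ∧ y < hi then some label else eraScan y rest

def era_bucket_py (year : Option Int) : String :=
  match year with
  | none => "unknown"
  | some y =>
    match eraScan y eraBuckets with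
    | some label => label
    | none => if y < 1940 then "pre-1940" else "2010+"

-- ===== PORT B =====
def era_bucket_py_alt (year : Option Int) : String :=
  match year with
  | none => "unknown"
  | some y =>
    if y < 1940 then "pre-1940"
    else if y ≥ 2010 then "2010+"
    else
      let decade := PySem.Int.floordiv y 10 * 10
      PySem.Int.toStr decade ++ "-" ++ PySem.Int.toStr (decade + 10)

-- ===== PRECONDITION & SPEC =====
def Spec_era_bucket_py (year : Option Int) (out : String) : Prop := out = era_bucket_py_alt year
instance (year : Option Int) (out : String) : Decidable (Spec_era_bucket_py year out) := by unfold Spec_era_bucket_py; infer_instance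

-- ===== CLAIM (what is proved, stated in full; the proofs are below) =====
def Claim_equal_era_bucket_py : Prop := ∀ (year : Option Int), Dom_era_bucket_py year → Spec_era_bucket_py year (era_bucket_py year)

-- ===== LEMMAS AND PROOFS =====

-- ===== VERDICT (by name: the statement is the Claim_ definition above) =====
theorem era_bucket_py_spec : Claim_equal_era_bucket_py := by
  intro year _
  unfold Spec_era_bucket_py
  match year with
  | none => rfl
  | some y =>
    by_cases hlo : y < 1940
    · simp only [era_bucket_py, era_bucket_py_alt, eraBuckets, eraScan]
      split_ifs <;> first | rfl | omega
    · by_cases hhi : 2010 ≤ y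
      · simp only [era_bucket_py, era_bucket_py_alt, eraBuckets, eraScan]
        split_ifs <;> first | rfl | omega
      · have h1 : 1940 ≤ y := by omega
        have h2 : y < 2010 := by omega
        interval_cases y <;> decide
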